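-- pv_equiv track=rewrite | github.com/Jihyeok11/Weekly-Algorithm | MakeMoneying/Week 4/1.py | solution
-- ===== SOURCE A (Python) =====
-- def checkteam(t, team):
--     for mb in team:
--         if not (mb-1) in t:
--             return False
--     else:
--         return True
--
-- def solution(skills, team, k):
--     answer = 0
--     teams = []
--     for i in range(len(skills) - k):
--         teams.append(list(range(i, k+i)))
--     for t in teams:
--         point = 0
--         for i in t:
--             point += skills[i]
--         if checkteam(t, team):
--             point *= 2
--         if answer < point:
--             answer = point
--     return answer
-- ===== SOURCE B (Python) =====
-- def solution(skills, team, k):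
--     n = len(skills)
--     if k <= 0 or n <= k:
--         return 0
--     lo = min(team) - 1 if team else 0
--     hi = max(team) - 1 if team else 0
--     best = 0
--     s = sum(skills[:k])
--     for i in range(n - k):
--         if i:
--             s += skills[i + k - 1] - skills[i - 1]
--         p = s
--         if not team or (i <= lo and hi < i + k):
--             p *= 2
--         if p > best:
--             best = p
--     return best
-- ===== Notes on version B (the rewrite author's own statement) =====
-- stated objective: faster
-- what changed: B replaces A's materialised index windows with a sliding window sum updated in O(1) per step, and replaces checkteam's per-member scan of each window by a single min/max of team tested against the window bounds; degenerate cases (k <= 0 or k >= len(skills)) return 0 directly.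
import Mathlib
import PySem

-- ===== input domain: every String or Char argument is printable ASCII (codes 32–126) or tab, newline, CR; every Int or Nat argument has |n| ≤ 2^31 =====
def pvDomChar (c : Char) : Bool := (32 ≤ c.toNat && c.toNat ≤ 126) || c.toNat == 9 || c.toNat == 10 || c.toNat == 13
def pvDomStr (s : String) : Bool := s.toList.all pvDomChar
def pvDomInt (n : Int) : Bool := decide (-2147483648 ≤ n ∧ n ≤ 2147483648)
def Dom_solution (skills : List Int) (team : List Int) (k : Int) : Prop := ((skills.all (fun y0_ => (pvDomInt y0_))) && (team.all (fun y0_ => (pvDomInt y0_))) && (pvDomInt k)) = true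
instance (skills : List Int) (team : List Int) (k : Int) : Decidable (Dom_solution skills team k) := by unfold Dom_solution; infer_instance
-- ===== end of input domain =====

-- B replaces A's per-window index loop and per-member range scan by a sliding window
-- sum plus a min/max bound test for the team condition (objective: faster).

-- ===== PORT A =====
def checkteam (t : List Int) (team : List Int) : Bool :=
  match team with
  | [] => true
  | mb :: rest => if ¬ (t.contains (mb - 1)) then false else checkteam t rest

def solution (skills : List Int) (team : List Int) (k : Int) : Int :=
  let teams := (PySem.List.pyRange 0 ((skills.length : Int) - k)).map
      (fun i => PySem.List.pyRange i (k + i))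
  teams.foldl
    (fun answer t =>
      -- indices i ∈ t are always in range when this loop runs, so pyGetD's default is never used
      let point := t.foldl (fun point i => point + PySem.List.pyGetD skills i 0) 0
      let point := if checkteam t team then point * 2 else point
      if answer < point then point else answer) 0

-- ===== PORT B =====
def solution_alt (skills : List Int) (team : List Int) (k : Int) : Int :=
  let n : Int := skills.length
  if k ≤ 0 ∨ n ≤ k then 0
  else
    let lo := if team.isEmpty then 0 else (PySem.List.min? team (fun y => y)).getD 0 - 1
    let hi := if team.isEmpty then 0 else (PySem.List.max? team (fun y => y)).getD 0 - 1
    let s0 := (PySem.List.slice skills none (some k)).sum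
    ((PySem.List.pyRange 0 (n - k)).foldl
      (fun (st : Int × Int) i =>
        -- indices i+k-1 and i-1 are always in range here, so pyGetD's default is never used
        let s := if i ≠ 0 then st.1 + PySem.List.pyGetD skills (i + k - 1) 0 - PySem.List.pyGetD skills (i - 1) 0 else st.1
        let p := if team.isEmpty ∨ (i ≤ lo ∧ hi < i + k) then s * 2 else s
        (s, if st.2 < p then p else st.2)) (s0, 0)).2

-- ===== PRECONDITION & SPEC =====
def Spec_solution (skills : List Int) (team : List Int) (k : Int) (out : Int) : Prop := out = solution_alt skills team k
instance (skills : List Int) (team : List Int) (k : Int) (out : Int) : Decidable (Spec_solution skills team k out) := by unfold Spec_solution; infer_instance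

-- ===== CLAIM (what is proved, stated in full; the proofs are below) =====
def Claim_equal_solution : Prop := ∀ (skills : List Int) (team : List Int) (k : Int), Dom_solution skills team k → Spec_solution skills team k (solution skills team k)

-- ===== LEMMAS AND PROOFS =====

-- A's per-window step, as a function of the window start index i
def stepA (skills team : List Int) (k : Int) (answer i : Int) : Int :=
  let t := PySem.List.pyRange i (k + i)
  let point := t.foldl (fun point j => point + PySem.List.pyGetD skills j 0) 0
  let point := if checkteam t team then point * 2 else point
  if answer < point then point else answer

-- sum of skills over index range [a, b)
def Mw (skills : List Int) (a b : Int) : Int :=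
  ((PySem.List.pyRange a b).map (fun j => PySem.List.pyGetD skills j 0)).sum

-- A's outer fold over windows is a fold of stepA over the window starts
lemma solution_eq_foldl (skills team : List Int) (k : Int) :
    solution skills team k
      = (PySem.List.pyRange 0 ((skills.length : Int) - k)).foldl (stepA skills team k) 0 := by
  simp only [solution, List.foldl_map]
  rfl

-- A's window value
def gval (skills team : List Int) (k i : Int) : Int :=
  if checkteam (PySem.List.pyRange i (k + i)) team then Mw skills i (k + i) * 2
  else Mw skills i (k + i)

lemma stepA_eq (skills team : List Int) (k a i : Int) :
    stepA skills team k a i = if a < gval skills team k i then gval skills team k i else a := by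
  simp [stepA, gval, Mw, PySem.List.foldl_add]

lemma checkteam_eq_all (t team : List Int) :
    checkteam t team = team.all (fun mb => t.contains (mb - 1)) := by
  induction team with
  | nil => rfl
  | cons mb rest ih =>
    rw [List.all_cons, ← ih, checkteam]
    simp

-- the sliding recurrence for the window sum
lemma Mw_slide (skills : List Int) (k a : Int) (hk : 0 < k) :
    Mw skills (a + 1) (k + (a + 1)) = Mw skills a (k + a) + PySem.List.pyGetD skills (k + a) 0 - PySem.List.pyGetD skills a 0 := by
  have h1 : PySem.List.pyRange (a + 1) (k + a + 1) = PySem.List.pyRange (a + 1) (k + a) ++ [k + a] :=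
    PySem.List.pyRange_one_succ_right (by omega)
  have h2 : PySem.List.pyRange a (k + a) = a :: PySem.List.pyRange (a + 1) (k + a) :=
    PySem.List.pyRange_one_cons (by omega)
  have h3 : k + (a + 1) = k + a + 1 := by ring
  rw [Mw, Mw, h3, h1, h2]
  simp; ring

-- the initial slice sum equals the first window sum
lemma slice_sum_eq_Mw (skills : List Int) (k : Int) (hk : 0 ≤ k) (hkn : k ≤ (skills.length : Int)) :
    (PySem.List.slice skills none (some k)).sum = Mw skills 0 k := by
  have hsplit : PySem.List.pyRange 0 ((skills.length : Int)) = PySem.List.pyRange 0 k ++ PySem.List.pyRange k (skills.length : Int) :=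
    PySem.List.pyRange_one_append 0 k _ hk hkn
  have hall := PySem.List.map_pyGetD_pyRange_zero skills (0 : Int)
  have hlen : ((PySem.List.pyRange 0 k).map (fun j => PySem.List.pyGetD skills j 0)).length = k.toNat := by
    simp [PySem.List.length_pyRange_one]
  have hlenx : PySem.List.len skills = ((skills.length : Int)) := by simp [PySem.List.len]
  rw [hlenx, hsplit, List.map_append] at hall
  have htake := congrArg (List.take k.toNat) hall
  rw [List.take_left' hlen] at htake
  rw [PySem.List.slice_to skills hk, Mw, ← htake]

-- B's team condition agrees with A's checkteam on each window
lemma cond_eq_checkteam (team : List Int) (k i : Int) :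
    ((team.isEmpty : Prop) ∨ (i ≤ (if team.isEmpty then 0 else (PySem.List.min? team (fun y => y)).getD 0 - 1)
        ∧ (if team.isEmpty then 0 else (PySem.List.max? team (fun y => y)).getD 0 - 1) < i + k))
      ↔ checkteam (PySem.List.pyRange i (k + i)) team = true := by
  rw [checkteam_eq_all]
  cases team with
  | nil => simp
  | cons x rest =>
    simp only [List.isEmpty_cons, Bool.false_eq_true, if_false, false_or]
    have hmn : PySem.List.min? (x :: rest) (fun y => y) = some (rest.foldl min x) :=
      PySem.List.min?_id_cons x rest
    have hmx : PySem.List.max? (x :: rest) (fun y => y) = some (rest.foldl max x) :=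
      PySem.List.max?_id_cons x rest
    rw [hmn, hmx]
    simp only [Option.getD_some, List.all_eq_true, List.contains_iff_mem,
      PySem.List.mem_pyRange_one]
    constructor
    · rintro ⟨h1, h2⟩ mb hmb
      have hmin := PySem.List.min?_isMin hmn mb hmb
      have hmax := PySem.List.max?_isMax hmx mb hmb
      simp only at hmin hmax
      refine ⟨by omega, by omega⟩
    · intro h
      have h1 := h (rest.foldl min x) (PySem.List.min?_mem hmn)
      have h2 := h (rest.foldl max x) (PySem.List.max?_mem hmx)
      exact ⟨by omega, by omega⟩

-- B's loop step
def stepB (skills team : List Int) (k lo hi : Int) (st : Int × Int) (i : Int) : Int × Int :=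
  let s := if i ≠ 0 then st.1 + PySem.List.pyGetD skills (i + k - 1) 0 - PySem.List.pyGetD skills (i - 1) 0 else st.1
  let p := if team.isEmpty ∨ (i ≤ lo ∧ hi < i + k) then s * 2 else s
  (s, if st.2 < p then p else st.2)

-- main invariant: B's fold carries the current window sum and A's running answer
lemma inv (skills team : List Int) (k : Int) (hk : 0 < k) :
    ∀ (j : Nat), (j : Int) ≤ (skills.length : Int) - k →
      (PySem.List.pyRange 0 (j : Int)).foldl
          (stepB skills team k
            (if team.isEmpty then 0 else (PySem.List.min? team (fun y => y)).getD 0 - 1)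
            (if team.isEmpty then 0 else (PySem.List.max? team (fun y => y)).getD 0 - 1))
          (Mw skills 0 k, 0)
        = (Mw skills ((j - 1 : Nat) : Int) (k + ((j - 1 : Nat) : Int)),
           (PySem.List.pyRange 0 (j : Int)).foldl (stepA skills team k) 0) := by
  intro j
  induction j with
  | zero => intro _; simp [PySem.List.pyRange_one_eq_nil]
  | succ j ih =>
    intro hle
    have hle' : (j : Int) ≤ (skills.length : Int) - k := by push_cast at hle ⊢; omega
    have hsucc : PySem.List.pyRange 0 ((j + 1 : Nat) : Int) = PySem.List.pyRange 0 (j : Int) ++ [(j : Int)] := by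
      have := PySem.List.pyRange_one_succ_right (a := 0) (b := (j : Int)) (Int.natCast_nonneg j)
      push_cast
      exact this
    rw [hsucc, List.foldl_append, List.foldl_append, ih hle']
    simp only [List.foldl_cons, List.foldl_nil]
    have hcond := cond_eq_checkteam team k (j : Int)
    have hstep : stepB skills team k
        (if team.isEmpty then 0 else (PySem.List.min? team (fun y => y)).getD 0 - 1)
        (if team.isEmpty then 0 else (PySem.List.max? team (fun y => y)).getD 0 - 1)
        (Mw skills ((j - 1 : Nat) : Int) (k + ((j - 1 : Nat) : Int)),
          (PySem.List.pyRange 0 (j : Int)).foldl (stepA skills team k) 0) (j : Int)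
        = (Mw skills (j : Int) (k + (j : Int)),
           stepA skills team k ((PySem.List.pyRange 0 (j : Int)).foldl (stepA skills team k) 0) (j : Int)) := by
      have hs : (if (j : Int) ≠ 0 then
            Mw skills ((j - 1 : Nat) : Int) (k + ((j - 1 : Nat) : Int)) + PySem.List.pyGetD skills ((j : Int) + k - 1) 0 - PySem.List.pyGetD skills ((j : Int) - 1) 0
          else Mw skills ((j - 1 : Nat) : Int) (k + ((j - 1 : Nat) : Int)))
          = Mw skills (j : Int) (k + (j : Int)) := by
        cases j with
        | zero => simp
        | succ jj =>
          have hne : ((jj + 1 : Nat) : Int) ≠ 0 := by push_cast; omega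
          have hcast : ((jj + 1 - 1 : Nat) : Int) = (jj : Int) := by push_cast; omega
          rw [if_pos hne, hcast]
          push_cast
          have e2 : ((jj : Int) + 1 + k - 1) = k + (jj : Int) := by ring
          have e3 : ((jj : Int) + 1 - 1) = (jj : Int) := by ring
          rw [e2, e3, Mw_slide skills k (jj : Int) hk]
      have hp : (if (team.isEmpty : Prop) ∨ ((j : Int) ≤ (if team.isEmpty then 0 else (PySem.List.min? team (fun y => y)).getD 0 - 1)
            ∧ (if team.isEmpty then 0 else (PySem.List.max? team (fun y => y)).getD 0 - 1) < (j : Int) + k)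
          then Mw skills (j : Int) (k + (j : Int)) * 2 else Mw skills (j : Int) (k + (j : Int)))
          = gval skills team k (j : Int) := by
        rw [gval]
        by_cases hc : checkteam (PySem.List.pyRange (j : Int) (k + (j : Int))) team = true
        · rw [if_pos (hcond.mpr hc), if_pos hc]
        · rw [if_neg (fun h => hc (hcond.mp h)), if_neg hc]
      rw [stepB]
      simp only [hs, hp]
      rw [stepA_eq]
    rw [hstep]
    have hj1 : ((j + 1 - 1 : Nat) : Int) = (j : Int) := by push_cast; omega
    rw [hj1]

-- a fold of a max-step over windows whose values are all ≤ the accumulator keeps it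
lemma foldl_stepA_const (skills team : List Int) (k : Int) (l : List Int) (c : Int)
    (h : ∀ i ∈ l, gval skills team k i ≤ c) :
    l.foldl (stepA skills team k) c = c := by
  induction l with
  | nil => rfl
  | cons x xs ih =>
    have hx := h x (by simp)
    rw [List.foldl_cons, stepA_eq, if_neg (by omega)]
    exact ih (fun i hi => h i (by simp [hi]))

-- ===== VERDICT (by name: the statement is the Claim_ definition above) =====
-- B's whole body when the main loop actually runs, as a fold of stepB
lemma solution_alt_eq_foldB (skills team : List Int) (k : Int)
    (h : ¬ (k ≤ 0 ∨ (skills.length : Int) ≤ k)) :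
    solution_alt skills team k
      = ((PySem.List.pyRange 0 ((skills.length : Int) - k)).foldl
          (stepB skills team k
            (if team.isEmpty then 0 else (PySem.List.min? team (fun y => y)).getD 0 - 1)
            (if team.isEmpty then 0 else (PySem.List.max? team (fun y => y)).getD 0 - 1))
          ((PySem.List.slice skills none (some k)).sum, 0)).2 := by
  unfold solution_alt stepB
  rw [if_neg h]

-- ===== VERDICT (by name: the statement is the Claim_ definition above) =====
theorem solution_spec : Claim_equal_solution := by
  intro skills team k _
  unfold Spec_solution
  by_cases hcase : k ≤ 0 ∨ (skills.length : Int) ≤ k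
  · have hB : solution_alt skills team k = 0 := by
      unfold solution_alt; rw [if_pos hcase]
    rw [hB, solution_eq_foldl]
    rcases hcase with hk | hn
    · apply foldl_stepA_const
      intro i _
      have hnil : PySem.List.pyRange i (k + i) = [] := PySem.List.pyRange_one_eq_nil (by omega)
      simp [gval, hnil, Mw]
    · rw [PySem.List.pyRange_one_eq_nil (by omega), List.foldl_nil]
  · have hk : 0 < k := by omega
    have hkn : k < (skills.length : Int) := by omega
    have hm : (((((skills.length : Int) - k)).toNat : Int)) = (skills.length : Int) - k :=
      Int.toNat_of_nonneg (by omega)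
    have hfold := inv skills team k hk ((skills.length : Int) - k).toNat (by omega)
    rw [hm] at hfold
    rw [solution_eq_foldl, solution_alt_eq_foldB skills team k hcase,
      slice_sum_eq_Mw skills k (by omega) (by omega), hfold]
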